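-- pv_equiv track=rewrite | github.com/AdamZhouSE/pythonHomework | Code/CodeRecords/2955/60696/289075.py | get_str_distance
-- ===== SOURCE A (Python) =====
-- K = 0
--
-- def get_char_distance(a,b):
--     if (ord(a) == ord(' ') and ord(b) != ord(' ')) or (ord(b) == ord(' ') and ord(a) != ord(' ')):
--         return K
--     else:
--         return abs(ord(a) - ord(b))
--
-- def get_str_distance(str1, str2):
--     n = len(str1)
--     m = len(str2)
--     distance = [[0 for i in range(m+1)] for i in range(n+1)]    # distance[i][j]表示str1前i个元素到str2前j个元素的距离
--     for j in range(m+1):    # 初始化, 空到前j个元素的距离为K*j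
--         distance[0][j] = K * j
--     for i in range(n+1):    # 初始化, 空到前i个元素的距离为K*i
--         distance[i][0] = K * i
--     for i in range(1, n+1):
--         for j in range(1, m+1):
--             distance[i][j] = max(distance[i-1][j-1]+get_char_distance(str1[i-1], str2[j-1]), distance[i-1][j]+K,
--                                  distance[i][j-1]+K)
--     return distance[n][m]
-- ===== SOURCE B (Python) =====
-- K = 0
--
-- def get_char_distance(a, b):
--     if (ord(a) == ord(' ') and ord(b) != ord(' ')) or (ord(b) == ord(' ') and ord(a) != ord(' ')):
--         return K
--     else:
--         return abs(ord(a) - ord(b))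
--
-- def get_str_distance(str1, str2):
--     memo = {}
--
--     def f(i, j):
--         if (i, j) in memo:
--             return memo[(i, j)]
--         if i == 0:
--             v = K * j
--         elif j == 0:
--             v = K * i
--         else:
--             v = max(f(i - 1, j - 1) + get_char_distance(str1[i - 1], str2[j - 1]),
--                     f(i - 1, j) + K,
--                     f(i, j - 1) + K)
--         memo[(i, j)] = v
--         return v
--
--     return f(len(str1), len(str2))
-- ===== Notes on version B (the rewrite author's own statement) =====
-- stated objective: alternative
-- what changed: replaced A's bottom-up (n+1)x(m+1) table fill (two init passes plus a nested loop) by a demand-driven top-down recursion f(i,j) memoized in a dict, inverting the evaluation direction while keeping the same recurrence and weights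
import Mathlib
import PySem

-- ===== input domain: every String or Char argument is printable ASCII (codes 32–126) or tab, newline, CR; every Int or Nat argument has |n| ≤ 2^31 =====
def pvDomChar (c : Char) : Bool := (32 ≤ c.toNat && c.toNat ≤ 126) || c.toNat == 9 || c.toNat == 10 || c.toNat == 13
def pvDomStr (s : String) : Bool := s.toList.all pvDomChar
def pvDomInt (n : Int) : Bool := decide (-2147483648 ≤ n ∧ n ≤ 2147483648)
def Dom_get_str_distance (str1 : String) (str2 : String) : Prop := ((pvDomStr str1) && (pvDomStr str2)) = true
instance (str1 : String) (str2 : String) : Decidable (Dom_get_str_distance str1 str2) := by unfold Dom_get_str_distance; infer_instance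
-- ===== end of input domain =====

-- B replaces A's bottom-up (n+1)×(m+1) table fill by a demand-driven top-down
-- recursion f(i,j) memoized in a dict; same recurrence and weights, inverted direction.

-- ===== PORT A =====
def pyK : Int := 0    -- module constant K = 0

def get_char_distance (a : Char) (b : Char) : Int :=
  if (a.toNat = ' '.toNat ∧ b.toNat ≠ ' '.toNat) ∨ (b.toNat = ' '.toNat ∧ a.toNat ≠ ' '.toNat) then
    pyK
  else
    |(a.toNat : Int) - (b.toNat : Int)|

-- distance[i][j] access/update on the list-of-lists table
def matGet (d : List (List Int)) (i j : Nat) : Int := (d.getD i []).getD j 0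
def matSet (d : List (List Int)) (i j : Nat) (v : Int) : List (List Int) :=
  d.set i ((d.getD i []).set j v)

def get_str_distance (str1 : String) (str2 : String) : Int :=
  let c1 := str1.toList
  let c2 := str2.toList
  let n := c1.length
  let m := c2.length
  -- distance = [[0 for i in range(m+1)] for i in range(n+1)]
  let d0 : List (List Int) := List.replicate (n+1) (List.replicate (m+1) 0)
  -- for j in range(m+1): distance[0][j] = K * j
  let d1 := (List.range (m+1)).foldl (fun d j => matSet d 0 j (pyK * (j : Int))) d0
  -- for i in range(n+1): distance[i][0] = K * i
  let d2 := (List.range (n+1)).foldl (fun d i => matSet d i 0 (pyK * (i : Int))) d1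
  -- nested fill, i = 1..n, j = 1..m
  let d3 := (List.range' 1 n).foldl (fun d i =>
      (List.range' 1 m).foldl (fun d j =>
        matSet d i j (max (max (matGet d (i-1) (j-1) + get_char_distance (c1.getD (i-1) ' ') (c2.getD (j-1) ' '))
                               (matGet d (i-1) j + pyK))
                          (matGet d i (j-1) + pyK))) d) d2
  matGet d3 n m

-- ===== PORT B =====
-- Source B's memoized recursion f(i,j) with its dict cache threaded through explicitly;
-- expressed as structural recursion on i (fB) with an inner recursion on j (fBsucc).
-- Every call checks the cache first and inserts after computing, exactly as Source B.
def fB0 (j : Nat) (memo : PySem.Dict (Nat × Nat) Int) : Int × PySem.Dict (Nat × Nat) Int :=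
  match memo.get? (0, j) with
  | some v => (v, memo)
  | none => (pyK * (j : Int), memo.insert (0, j) (pyK * (j : Int)))

def fBsucc (c1 c2 : List Char) (k : Nat)
    (fk : Nat → PySem.Dict (Nat × Nat) Int → Int × PySem.Dict (Nat × Nat) Int) :
    Nat → PySem.Dict (Nat × Nat) Int → Int × PySem.Dict (Nat × Nat) Int
  | 0, memo =>
    (match memo.get? (k+1, 0) with
     | some v => (v, memo)
     | none => (pyK * ((k+1 : Nat) : Int), memo.insert (k+1, 0) (pyK * ((k+1 : Nat) : Int))))
  | j+1, memo =>
    (match memo.get? (k+1, j+1) with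
     | some v => (v, memo)
     | none =>
       let p1 := fk j memo
       let p2 := fk (j+1) p1.2
       let p3 := fBsucc c1 c2 k fk j p2.2
       let v := max (max (p1.1 + get_char_distance (c1.getD k ' ') (c2.getD j ' ')) (p2.1 + pyK)) (p3.1 + pyK)
       (v, p3.2.insert (k+1, j+1) v))

def fB (c1 c2 : List Char) : Nat → Nat → PySem.Dict (Nat × Nat) Int → Int × PySem.Dict (Nat × Nat) Int
  | 0 => fB0
  | k+1 => fBsucc c1 c2 k (fB c1 c2 k)

def get_str_distance_alt (str1 : String) (str2 : String) : Int :=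
  (fB str1.toList str2.toList str1.toList.length str2.toList.length PySem.Dict.empty).1

-- ===== PRECONDITION & SPEC =====
def Spec_get_str_distance (str1 : String) (str2 : String) (out : Int) : Prop := out = get_str_distance_alt str1 str2
instance (str1 : String) (str2 : String) (out : Int) : Decidable (Spec_get_str_distance str1 str2 out) := by unfold Spec_get_str_distance; infer_instance

-- ===== CLAIM (what is proved, stated in full; the proofs are below) =====
def Claim_equal_get_str_distance : Prop := ∀ (str1 : String) (str2 : String), Dom_get_str_distance str1 str2 → Spec_get_str_distance str1 str2 (get_str_distance str1 str2)

-- ===== LEMMAS AND PROOFS =====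

-- The common DP value, row-shaped (matching A's table) …
def dRow (prev : Nat → Int) (a : Char) (cs2 : List Char) (i : Nat) : Nat → Int
  | 0 => pyK * (i : Int)
  | j+1 => max (max (prev j + get_char_distance a (cs2.getD j ' '))
                    (prev (j+1) + pyK))
               (dRow prev a cs2 i j + pyK)

def dFun (cs1 cs2 : List Char) : Nat → Nat → Int
  | 0, j => pyK * (j : Int)
  | k+1, j => dRow (dFun cs1 cs2 k) (cs1.getD k ' ') cs2 (k+1) j

-- … and cell-shaped (matching B's recursion)
def gB (c1 c2 : List Char) : Nat → Nat → Int
  | 0, j => pyK * (j : Int)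
  | i+1, 0 => pyK * ((i+1 : Nat) : Int)
  | i+1, j+1 => max (max (gB c1 c2 i j + get_char_distance (c1.getD i ' ') (c2.getD j ' '))
                         (gB c1 c2 i (j+1) + pyK))
                    (gB c1 c2 (i+1) j + pyK)
  termination_by i j => (i, j)

-- the finished row i as a list, and the zero row
def fRow (cs1 cs2 : List Char) (m i : Nat) : List Int := (List.range (m+1)).map (dFun cs1 cs2 i)
def zRow (m : Nat) : List Int := List.replicate (m+1) (0 : Int)
def pRow (cs1 cs2 : List Char) (m i j : Nat) : List Int :=
  (List.range (j+1)).map (dFun cs1 cs2 i) ++ List.replicate (m - j) 0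

lemma getD_map_range {α : Type} (f : Nat → α) (dft : α) (c t : Nat) (ht : t < c) :
    ((List.range c).map f).getD t dft = f t := by
  simp [List.getD, ht]

lemma dFun_zero_right (cs1 cs2 : List Char) (i : Nat) : dFun cs1 cs2 i 0 = 0 := by
  cases i <;> simp [dFun, dRow, pyK]

lemma pRow_zero (cs1 cs2 : List Char) (m i : Nat) : pRow cs1 cs2 m i 0 = zRow m := by
  simp [pRow, zRow, dFun_zero_right]
  cases m <;> simp [List.replicate]

lemma pRow_last (cs1 cs2 : List Char) (m i : Nat) : pRow cs1 cs2 m i m = fRow cs1 cs2 m i := by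
  simp [pRow, fRow]

-- the two init loops leave the all-zero table unchanged (K = 0)
lemma matSet_zrow (n m i : Nat) :
    matSet (List.replicate (n+1) (zRow m)) i 0 0 = List.replicate (n+1) (zRow m) := by
  unfold matSet
  rcases Nat.lt_or_ge i (n+1) with h | h
  · simp [List.getD, h, zRow]
  · exact List.set_eq_of_length_le (by rw [List.length_replicate]; omega)

lemma init_loops (n m : Nat) :
    (List.range (n+1)).foldl (fun d i => matSet d i 0 (pyK * (i : Int)))
      ((List.range (m+1)).foldl (fun d j => matSet d 0 j (pyK * (j : Int)))
        (List.replicate (n+1) (List.replicate (m+1) 0)))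
    = List.replicate (n+1) (zRow m) := by
  have h1 : (List.range (m+1)).foldl (fun d j => matSet d 0 j (pyK * (j : Int)))
      (List.replicate (n+1) (List.replicate (m+1) 0)) = List.replicate (n+1) (zRow m) := by
    rw [List.foldl_fixed']
    · rfl
    · intro j
      simp [matSet, pyK, List.getD]
  rw [h1, List.foldl_fixed']
  intro i
  simpa [pyK] using matSet_zrow n m i

-- getD / set on an append at the middle position
lemma getD_append_mid {α : Type} (l1 : List α) (x : α) (l2 : List α) (dft : α) :
    ((l1 ++ x :: l2).getD l1.length dft) = x := by
  simp [List.getD]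

lemma getD_append_left {α : Type} (l1 l2 : List α) (t : Nat) (dft : α) (ht : t < l1.length) :
    ((l1 ++ l2).getD t dft) = l1.getD t dft := by
  simp [List.getD, List.getElem?_append_left ht]

lemma set_append_mid {α : Type} (l1 : List α) (x : α) (l2 : List α) (v : α) (t : Nat)
    (ht : t = l1.length) : (l1 ++ x :: l2).set t v = l1 ++ v :: l2 := by
  subst ht
  rw [List.set_append_right _ _ (Nat.le_refl _)]
  simp

-- A's inner loop fills row r = k+1 cell by cell
lemma A_inner (cs1 cs2 : List Char) (m k r : Nat) (hr : r = k + 1) (pre suf : List (List Int))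
    (hpre : pre = (List.range (k+1)).map (fRow cs1 cs2 m)) (j : Nat) (hj : j ≤ m) :
    (List.range' 1 j).foldl (fun d j =>
        matSet d r j (max (max (matGet d (r-1) (j-1) + get_char_distance (cs1.getD (r-1) ' ') (cs2.getD (j-1) ' '))
                               (matGet d (r-1) j + pyK))
                          (matGet d r (j-1) + pyK)))
      (pre ++ zRow m :: suf)
    = pre ++ pRow cs1 cs2 m r j :: suf := by
  subst hr
  have hlen : pre.length = k + 1 := by simp [hpre]
  induction j with
  | zero => rw [pRow_zero]; rfl
  | succ j ih =>
    rw [List.range'_concat, List.foldl_append, ih (by omega)]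
    simp only [Nat.one_mul, List.foldl_cons, List.foldl_nil]
    rw [show (1 + j) = (j + 1) by omega]
    simp only [Nat.add_sub_cancel]
    have hgk : (pre ++ pRow cs1 cs2 m (k+1) j :: suf).getD k [] = fRow cs1 cs2 m k := by
      rw [getD_append_left _ _ _ _ (by omega), hpre, getD_map_range _ _ _ _ (by omega)]
    have hgr : (pre ++ pRow cs1 cs2 m (k+1) j :: suf).getD (k+1) [] = pRow cs1 cs2 m (k+1) j := by
      rw [← hlen, getD_append_mid]
    have hrep : List.replicate (m - j) (0:Int) = 0 :: List.replicate (m - (j+1)) 0 := by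
      have : m - j = (m - (j+1)) + 1 := by omega
      rw [this, List.replicate_succ]
    unfold matGet matSet
    rw [hgk, hgr]
    have hv1 : (fRow cs1 cs2 m k).getD j 0 = dFun cs1 cs2 k j := by
      rw [fRow, getD_map_range _ _ _ _ (by omega)]
    have hv2 : (fRow cs1 cs2 m k).getD (j+1) 0 = dFun cs1 cs2 k (j+1) := by
      rw [fRow, getD_map_range _ _ _ _ (by omega)]
    have hv3 : (pRow cs1 cs2 m (k+1) j).getD j 0 = dFun cs1 cs2 (k+1) j := by
      rw [pRow, getD_append_left _ _ _ _ (by simp), getD_map_range _ _ _ _ (by omega)]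
    rw [hv1, hv2, hv3]
    simp only [pRow]
    rw [hrep]
    rw [set_append_mid pre _ suf _ _ hlen.symm]
    rw [set_append_mid _ _ _ _ _ (by simp)]
    congr 2
    conv_rhs => rw [List.range_succ, List.map_append]
    simp only [List.map_cons, List.map_nil, List.append_assoc, List.cons_append, List.nil_append]
    congr 2

lemma fRow_zero (cs1 cs2 : List Char) (m : Nat) : fRow cs1 cs2 m 0 = zRow m := by
  simp [fRow, zRow, dFun, pyK, List.map_const']

-- A's outer loop: after i rows, the first i+1 rows are final, the rest untouched zeros
lemma A_outer (cs1 cs2 : List Char) (m n i : Nat) (hi : i ≤ n) :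
    (List.range' 1 i).foldl (fun d i =>
      (List.range' 1 m).foldl (fun d j =>
        matSet d i j (max (max (matGet d (i-1) (j-1) + get_char_distance (cs1.getD (i-1) ' ') (cs2.getD (j-1) ' '))
                               (matGet d (i-1) j + pyK))
                          (matGet d i (j-1) + pyK))) d)
      (List.replicate (n+1) (zRow m))
    = (List.range (i+1)).map (fRow cs1 cs2 m) ++ List.replicate (n - i) (zRow m) := by
  induction i with
  | zero =>
    simp [List.range_succ, fRow_zero, List.replicate_succ]
  | succ i ih =>
    rw [List.range'_concat, List.foldl_append, ih (by omega)]
    simp only [Nat.one_mul, List.foldl_cons, List.foldl_nil]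
    have hrep : List.replicate (n - i) (zRow m) = zRow m :: List.replicate (n - (i+1)) (zRow m) := by
      have : n - i = (n - (i+1)) + 1 := by omega
      rw [this, List.replicate_succ]
    rw [hrep]
    rw [A_inner cs1 cs2 m i (1+i) (by omega) _ _ rfl m (Nat.le_refl m)]
    rw [show (1+i) = (i+1) by omega, pRow_last]
    conv_rhs => rw [List.range_succ, List.map_append]
    simp

lemma A_eq (str1 str2 : String) :
    get_str_distance str1 str2 = dFun str1.toList str2.toList str1.toList.length str2.toList.length := by
  unfold get_str_distance
  simp only []
  rw [init_loops, A_outer _ _ _ _ _ (Nat.le_refl _)]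
  simp only [Nat.sub_self, List.replicate_zero, List.append_nil]
  unfold matGet
  rw [getD_map_range _ _ _ _ (by omega), fRow, getD_map_range _ _ _ _ (by omega)]

-- gB (B's recursion, unmemoized) equals dFun (A's table value)
lemma gB_eq_dFun (cs1 cs2 : List Char) : ∀ i j, gB cs1 cs2 i j = dFun cs1 cs2 i j := by
  intro i
  induction i with
  | zero => intro j; simp [gB, dFun]
  | succ k ihk =>
    intro j
    induction j with
    | zero => simp [gB, dFun, dRow]
    | succ j ihj =>
      show gB cs1 cs2 (k+1) (j+1) = dFun cs1 cs2 (k+1) (j+1)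
      rw [gB, ihk j, ihk (j+1), ihj]
      simp [dFun, dRow]

-- memoization invariant: every cached value is the spec value
def GoodMemo (cs1 cs2 : List Char) (memo : PySem.Dict (Nat × Nat) Int) : Prop :=
  ∀ i j v, memo.get? (i, j) = some v → v = gB cs1 cs2 i j

lemma goodMemo_insert (cs1 cs2 : List Char) (memo : PySem.Dict (Nat × Nat) Int)
    (h : GoodMemo cs1 cs2 memo) (i j : Nat) (v : Int) (hv : v = gB cs1 cs2 i j) :
    GoodMemo cs1 cs2 (memo.insert (i, j) v) := by
  intro i' j' w hw
  rw [PySem.Dict.get?_insert] at hw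
  split at hw
  · rename_i heq
    obtain ⟨h1, h2⟩ := Prod.mk.inj heq
    subst h1; subst h2
    cases hw
    exact hv
  · exact h i' j' w hw

lemma fB0_correct (cs1 cs2 : List Char) (j : Nat) (memo : PySem.Dict (Nat × Nat) Int)
    (hm : GoodMemo cs1 cs2 memo) :
    (fB0 j memo).1 = gB cs1 cs2 0 j ∧ GoodMemo cs1 cs2 (fB0 j memo).2 := by
  unfold fB0
  cases hg : memo.get? (0, j) with
  | some v => exact ⟨hm 0 j v hg, hm⟩
  | none =>
    refine ⟨by simp [gB], ?_⟩
    exact goodMemo_insert cs1 cs2 memo hm 0 j _ (by simp [gB])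

lemma fBsucc_correct (cs1 cs2 : List Char) (k : Nat)
    (fk : Nat → PySem.Dict (Nat × Nat) Int → Int × PySem.Dict (Nat × Nat) Int)
    (hfk : ∀ j memo, GoodMemo cs1 cs2 memo →
      (fk j memo).1 = gB cs1 cs2 k j ∧ GoodMemo cs1 cs2 (fk j memo).2) :
    ∀ j memo, GoodMemo cs1 cs2 memo →
      (fBsucc cs1 cs2 k fk j memo).1 = gB cs1 cs2 (k+1) j ∧
      GoodMemo cs1 cs2 (fBsucc cs1 cs2 k fk j memo).2 := by
  intro j
  induction j with
  | zero =>
    intro memo hm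
    unfold fBsucc
    cases hg : memo.get? (k+1, 0) with
    | some v => exact ⟨hm (k+1) 0 v hg, hm⟩
    | none =>
      refine ⟨by simp [gB], ?_⟩
      exact goodMemo_insert cs1 cs2 memo hm (k+1) 0 _ (by simp [gB])
  | succ j ihj =>
    intro memo hm
    unfold fBsucc
    cases hg : memo.get? (k+1, j+1) with
    | some v => exact ⟨hm (k+1) (j+1) v hg, hm⟩
    | none =>
      obtain ⟨h1, hm1⟩ := hfk j memo hm
      obtain ⟨h2, hm2⟩ := hfk (j+1) (fk j memo).2 hm1
      obtain ⟨h3, hm3⟩ := ihj (fk (j+1) (fk j memo).2).2 hm2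
      simp only []
      rw [h1, h2, h3]
      refine ⟨by rw [gB], ?_⟩
      exact goodMemo_insert cs1 cs2 _ hm3 (k+1) (j+1) _ (by rw [gB])

lemma fB_correct (cs1 cs2 : List Char) : ∀ i j memo, GoodMemo cs1 cs2 memo →
    (fB cs1 cs2 i j memo).1 = gB cs1 cs2 i j ∧ GoodMemo cs1 cs2 (fB cs1 cs2 i j memo).2 := by
  intro i
  induction i with
  | zero => exact fun j memo hm => fB0_correct cs1 cs2 j memo hm
  | succ k ihk => exact fun j memo hm => fBsucc_correct cs1 cs2 k (fB cs1 cs2 k) ihk j memo hm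

lemma goodMemo_empty (cs1 cs2 : List Char) : GoodMemo cs1 cs2 PySem.Dict.empty := by
  intro i j v hv
  simp [PySem.Dict.get?_empty] at hv

lemma B_eq (str1 str2 : String) :
    get_str_distance_alt str1 str2 = dFun str1.toList str2.toList str1.toList.length str2.toList.length := by
  unfold get_str_distance_alt
  rw [(fB_correct str1.toList str2.toList _ _ _ (goodMemo_empty _ _)).1, gB_eq_dFun]

-- ===== VERDICT (by name: the statement is the Claim_ definition above) =====
theorem get_str_distance_spec : Claim_equal_get_str_distance := by
  intro str1 str2 _
  unfold Spec_get_str_distance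
  rw [A_eq, B_eq]
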